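-- pv_equiv track=rewrite | github.com/chinesedfan/extract-scripts | extract_mpq.py | get_build_chains
-- ===== SOURCE A (Python) =====
-- def get_build_chains(builds):
-- 	chains = []
-- 	for base_build in builds[0]:
-- 		chain = []
--
-- 		def get_build_chain(build):
-- 			chain.append(build)
-- 			if build in builds:
-- 				return get_build_chain(builds[build][0])
-- 			return chain
--
-- 		chains.append(get_build_chain(base_build))
--
-- 	return chains
-- ===== SOURCE B (Python) =====
-- def get_build_chains(builds):
--     def steps(b):
--         n = 0
--         while b in builds:
--             b = builds[b][0]
--             n += 1
--         return n
--
--     def materialize(b, n):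
--         if n == 0:
--             return [b]
--         return [b] + materialize(builds[b][0], n - 1)
--
--     return [materialize(base, steps(base)) for base in builds[0]]
-- ===== Notes on version B (the rewrite author's own statement) =====
-- stated objective: alternative
-- what changed: A's nested recursive closure mutating a shared accumulator is replaced by two staged passes per base build: an iterative counter first measures the chain length, then a pure recursion materializes the chain of that exact length front-to-back.
import Mathlib
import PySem

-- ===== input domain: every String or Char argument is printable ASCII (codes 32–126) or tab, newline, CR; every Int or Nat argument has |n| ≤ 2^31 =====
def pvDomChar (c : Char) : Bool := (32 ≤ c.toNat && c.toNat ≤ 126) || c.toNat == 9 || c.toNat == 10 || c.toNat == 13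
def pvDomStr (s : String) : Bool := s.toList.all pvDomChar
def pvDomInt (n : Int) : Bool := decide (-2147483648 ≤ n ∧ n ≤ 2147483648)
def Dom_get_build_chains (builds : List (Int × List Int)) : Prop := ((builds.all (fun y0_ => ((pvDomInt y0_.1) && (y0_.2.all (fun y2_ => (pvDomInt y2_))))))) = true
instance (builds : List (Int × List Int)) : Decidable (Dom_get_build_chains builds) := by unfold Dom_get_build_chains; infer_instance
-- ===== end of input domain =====

-- B replaces A's nested recursive closure (which mutates a shared accumulator) by two staged
-- passes per base build: count the chain length iteratively, then materialize the chain of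
-- that exact length by a pure front-to-back recursion (alternative; same asymptotic cost).

-- ===== PORT A =====
-- the nested closure get_build_chain: 'chain' is the mutated accumulator, appended to before
-- the membership test; fuel bounds the recursion depth (inside Pre_ a chain makes at most
-- builds.length successful lookups, so the fuel is never exhausted there; on inputs where the
-- Python recursion would not terminate A raises RecursionError and Pre_ excludes them).
def pvChainA (builds : List (Int × List Int)) : Nat → List Int → Int → List Int
  | fuel, chain, build =>
    let chain := chain ++ [build]                       -- chain.append(build)
    match (PySem.Dict.mk builds).get? build with        -- if build in builds:
    | some v =>
      match fuel with
      | 0 => chain                                      -- unreachable inside Pre_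
      | f + 1 => pvChainA builds f chain (v.headD 0)    -- return get_build_chain(builds[build][0]); v ≠ [] inside Pre_
    | none => chain                                     -- return chain

def get_build_chains (builds : List (Int × List Int)) : List (List Int) :=
  match (PySem.Dict.mk builds).get? 0 with              -- builds[0]; none = KeyError, excluded by Pre_
  | none => []
  | some bases =>
    bases.foldl (fun chains base_build =>
      chains ++ [pvChainA builds (builds.length + 1) [] base_build]) []   -- chains.append(get_build_chain(base_build))

-- ===== PORT B =====
-- builds[b][0] (both lookups succeed wherever B evaluates this inside Pre_)
def pvSucc (builds : List (Int × List Int)) (b : Int) : Int :=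
  (((PySem.Dict.mk builds).get? b).getD []).headD 0

-- steps(b): the while-loop counting hops until b leaves the key set; ported with fuel
-- (inside Pre_ the walk escapes within builds.length + 1 hops, so fuel never runs out)
def pvSteps (builds : List (Int × List Int)) : Nat → Int → Nat → Nat
  | fuel, b, n =>
    if ((PySem.Dict.mk builds).get? b).isSome then      -- while b in builds:
      match fuel with
      | 0 => n                                          -- unreachable inside Pre_
      | f + 1 => pvSteps builds f (pvSucc builds b) (n + 1)   -- b = builds[b][0]; n += 1
    else n                                              -- return n

-- materialize(b, n): [b] when n == 0, else [b] + materialize(builds[b][0], n - 1)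
def pvMaterialize (builds : List (Int × List Int)) : Int → Nat → List Int
  | b, 0 => [b]
  | b, n + 1 => b :: pvMaterialize builds (pvSucc builds b) n

def get_build_chains_alt (builds : List (Int × List Int)) : List (List Int) :=
  (((PySem.Dict.mk builds).get? 0).getD []).map (fun base =>
    pvMaterialize builds base (pvSteps builds (builds.length + 1) base 0))
    -- [materialize(base, steps(base)) for base in builds[0]]

-- ===== PRECONDITION & SPEC =====
-- pvEscapes builds fuel b: following head-successors from b, every visited key has a nonempty
-- value and the walk leaves the key set within fuel steps.
def pvEscapes (builds : List (Int × List Int)) : Nat → Int → Bool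
  | fuel, b =>
    match (PySem.Dict.mk builds).get? b with
    | none => true
    | some v =>
      !v.isEmpty && (match fuel with
        | 0 => false
        | f + 1 => pvEscapes builds f (v.headD 0))

-- Exactly the inputs on which the Python A returns: 0 is a key (else KeyError), and from every
-- base build the chain of head-successors meets only nonempty values (else IndexError) and
-- leaves the key set (else the recursion never terminates: RecursionError) — since it then
-- visits distinct keys, builds.length + 1 steps suffice. Keys are distinct because the
-- association list represents a Python dict. A's return-domain is a reachability condition
-- (the walk the dict encodes must terminate), so pvEscapes necessarily walks the successor
-- graph; any closed-form approximation (e.g. 'all values nonempty') would exclude inputs A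
-- returns on.
def Pre_get_build_chains (builds : List (Int × List Int)) : Prop :=
  (builds.map Prod.fst).Nodup ∧
  ((PySem.Dict.mk builds).get? 0).isSome = true ∧
  ∀ b ∈ ((PySem.Dict.mk builds).get? 0).getD [], pvEscapes builds (builds.length + 1) b = true
instance (builds : List (Int × List Int)) : Decidable (Pre_get_build_chains builds) := by
  unfold Pre_get_build_chains; infer_instance

def pvWitness_get_build_chains : (List (Int × List Int)) := [(0, [1, 2]), (1, [3])]

def Spec_get_build_chains (builds : List (Int × List Int)) (out : List (List Int)) : Prop := out = get_build_chains_alt builds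
instance (builds : List (Int × List Int)) (out : List (List Int)) : Decidable (Spec_get_build_chains builds out) := by unfold Spec_get_build_chains; infer_instance

-- ===== CLAIM (what is proved, stated in full; the proofs are below) =====
def Claim_equal_get_build_chains : Prop := ∀ (builds : List (Int × List Int)), Dom_get_build_chains builds → Pre_get_build_chains builds → Spec_get_build_chains builds (get_build_chains builds)

-- ===== LEMMAS AND PROOFS =====

-- the steps counter is the count from 0, shifted by its accumulator
theorem pvSteps_acc (builds : List (Int × List Int)) :
    ∀ (fuel : Nat) (b : Int) (n : Nat),
      pvSteps builds fuel b n = pvSteps builds fuel b 0 + n := by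
  intro fuel
  induction fuel with
  | zero =>
    intro b n
    rw [pvSteps, pvSteps]
    split <;> simp
  | succ f ih =>
    intro b n
    rw [pvSteps, pvSteps]
    split
    · rw [ih _ (n + 1), ih _ (0 + 1)]; omega
    · simp

-- wherever the walk escapes within the fuel, A's accumulator recursion is the chain of the
-- counted length, materialized front-to-back, prefixed by the accumulator
theorem pvChainA_eq_materialize (builds : List (Int × List Int)) :
    ∀ (fuel : Nat) (chain : List Int) (b : Int),
      pvEscapes builds fuel b = true →
      pvChainA builds fuel chain b =
        chain ++ pvMaterialize builds b (pvSteps builds fuel b 0) := by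
  intro fuel
  induction fuel with
  | zero =>
    intro chain b hesc
    rw [pvEscapes] at hesc
    rw [pvChainA, pvSteps]
    cases h : (PySem.Dict.mk builds).get? b with
    | none => simp [pvMaterialize]
    | some v => rw [h] at hesc; simp at hesc
  | succ f ih =>
    intro chain b hesc
    rw [pvEscapes] at hesc
    rw [pvChainA, pvSteps]
    cases h : (PySem.Dict.mk builds).get? b with
    | none => simp [pvMaterialize]
    | some v =>
      rw [h] at hesc
      simp only [Bool.and_eq_true] at hesc
      have hsucc : pvSucc builds b = v.headD 0 := by simp [pvSucc, h]
      simp only [Option.isSome_some, if_pos]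
      rw [ih (chain ++ [b]) (v.headD 0) hesc.2, pvSteps_acc builds f _ (0 + 1)]
      rw [hsucc, pvMaterialize]
      simp [hsucc]

-- ===== VERDICT (by name: the statement is the Claim_ definition above) =====
theorem get_build_chains_spec : Claim_equal_get_build_chains := by
  intro builds _ hpre
  unfold Spec_get_build_chains get_build_chains get_build_chains_alt
  obtain ⟨-, hsome, hesc⟩ := hpre
  cases hkey : (PySem.Dict.mk builds).get? 0 with
  | none => rw [hkey] at hsome; simp at hsome
  | some bases =>
    simp only [Option.getD_some]
    rw [PySem.List.foldl_append_singleton_eq_map]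
    refine List.map_congr_left ?_
    intro b hb
    have := hesc b (by rw [hkey] at *; simpa using hb)
    simpa using pvChainA_eq_materialize builds (builds.length + 1) [] b this
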